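-- pv_equiv track=rewrite | github.com/ericlevicky/advent-of-code | src/year_2025/day_2/code.py | _generate_repeated_numbers
-- ===== SOURCE A (Python) =====
-- def _generate_repeated_numbers(max_len: int) -> set[int]:
--     """Generate all numbers up to max_len digits that are repeated patterns (>=2 repeats)."""
--     repeated: set[int] = set()
--     for total_len in range(2, max_len + 1):
--         # For each possible pattern length that divides total_len
--         for k in range(1, total_len // 2 + 1):
--             if total_len % k != 0:
--                 continue
--             repeats = total_len // k
--             if repeats < 2:
--                 continue
--             start = 10 ** (k - 1)  # pattern cannot start with 0
--             end = 10**k - 1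
--             for pattern in range(start, end + 1):
--                 s = str(pattern) * repeats
--                 num = int(s)
--                 repeated.add(num)
--     return repeated
-- ===== SOURCE B (Python) =====
-- def _generate_repeated_numbers(max_len: int) -> set[int]:
--     """Generate all numbers up to max_len digits that are repeated patterns (>=2 repeats)."""
--     # Stage 1: for every usable pattern length, the aperiodic ("primitive") patterns.
--     primitive = {}
--     for k in range(1, max_len // 2 + 1):
--         primitive[k] = [
--             p for p in range(10 ** (k - 1), 10**k)
--             if all(str(p) != str(p)[:d] * (k // d) for d in range(1, k) if k % d == 0)
--         ]
--     # Stage 2: every repetition of a primitive pattern is a distinct new number,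
--     # so plain concatenation needs no membership bookkeeping.
--     out = []
--     for total_len in range(2, max_len + 1):
--         for k in range(1, total_len // 2 + 1):
--             if total_len % k == 0:
--                 out.extend(int(str(p) * (total_len // k)) for p in primitive[k])
--     return set(out)
-- ===== Notes on version B (the rewrite author's own statement) =====
-- stated objective: alternative
-- what changed: B replaces A's set-membership deduplication by a number-theoretic one: it precomputes, once per pattern length, the list of primitive (aperiodic) patterns, and then builds the result by plain concatenation of their repetitions, which are all distinct, so no membership checks remain.
import Mathlib
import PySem

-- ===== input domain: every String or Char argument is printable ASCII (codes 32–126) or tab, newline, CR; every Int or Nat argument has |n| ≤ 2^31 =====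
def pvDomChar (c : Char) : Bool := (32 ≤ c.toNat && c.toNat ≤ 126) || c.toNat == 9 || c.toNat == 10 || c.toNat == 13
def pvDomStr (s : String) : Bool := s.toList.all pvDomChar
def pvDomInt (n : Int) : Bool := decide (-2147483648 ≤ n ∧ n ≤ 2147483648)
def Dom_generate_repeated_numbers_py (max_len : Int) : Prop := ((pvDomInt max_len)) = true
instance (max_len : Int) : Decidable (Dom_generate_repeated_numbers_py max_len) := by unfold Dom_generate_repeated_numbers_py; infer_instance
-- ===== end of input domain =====

-- B replaces A's set-membership deduplication by a number-theoretic one (primitive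
-- patterns precomputed per length, repetitions concatenated without membership checks);
-- objective: alternative decomposition, same cost.

-- ===== PORT A =====
-- Literal port of _generate_repeated_numbers. int(s) is ported as (ofChars? s).getD 0:
-- s is always a nonempty digit string here, so Python's int() never raises (exact).
-- 10 ** (k - 1) is ported with the Nat exponent (k - 1).toNat: here 1 ≤ k always (exact).
def generate_repeated_numbers_py (max_len : Int) : List Int :=
  (PySem.List.pyRange 2 (max_len + 1) 1).foldl (fun repeated total_len =>
    (PySem.List.pyRange 1 (PySem.Int.floordiv total_len 2 + 1) 1).foldl (fun repeated k =>
      if PySem.Int.mod total_len k ≠ 0 then repeated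
      else
        let repeats := PySem.Int.floordiv total_len k
        if repeats < 2 then repeated
        else
          let start := (10 : Int) ^ (k - 1).toNat
          let endv := (10 : Int) ^ k.toNat - 1
          (PySem.List.pyRange start (endv + 1) 1).foldl (fun repeated pattern =>
            let str := PySem.List.pyRepeat (PySem.Int.toChars pattern) repeats
            let num := (PySem.Int.ofChars? str).getD 0
            PySem.Set.add repeated num) repeated) repeated) PySem.Set.empty

-- ===== PORT B =====
-- Literal port of Source B (same conventions for int(), str * n and 10 ** (k - 1)).
-- primitive[k] is ported as (prim.get? k).getD []: stage 2 only looks up keys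
-- 1 ≤ k ≤ total_len//2 ≤ max_len//2, all inserted in stage 1, so KeyError is impossible (exact).
def generate_repeated_numbers_py_alt (max_len : Int) : List Int :=
  let prim : PySem.Dict Int (List Int) :=
    (PySem.List.pyRange 1 (PySem.Int.floordiv max_len 2 + 1) 1).foldl (fun prim k =>
      prim.insert k
        ((PySem.List.pyRange ((10 : Int) ^ (k - 1).toNat) ((10 : Int) ^ k.toNat) 1).filter
          (fun p =>
            ((PySem.List.pyRange 1 k 1).filter (fun d => decide (PySem.Int.mod k d = 0))).all
              (fun d => decide (PySem.Int.toChars p ≠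
                PySem.List.pyRepeat (PySem.List.slice (PySem.Int.toChars p) none (some d))
                  (PySem.Int.floordiv k d)))))) PySem.Dict.empty
  let out : List Int :=
    (PySem.List.pyRange 2 (max_len + 1) 1).foldl (fun out total_len =>
      (PySem.List.pyRange 1 (PySem.Int.floordiv total_len 2 + 1) 1).foldl (fun out k =>
        if PySem.Int.mod total_len k = 0 then
          out ++ ((prim.get? k).getD []).map (fun p =>
            (PySem.Int.ofChars? (PySem.List.pyRepeat (PySem.Int.toChars p)
              (PySem.Int.floordiv total_len k))).getD 0)
        else out) out) []
  PySem.Set.ofList out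

-- ===== PRECONDITION & SPEC =====
def Spec_generate_repeated_numbers_py (max_len : Int) (out : List Int) : Prop := out = generate_repeated_numbers_py_alt max_len
instance (max_len : Int) (out : List Int) : Decidable (Spec_generate_repeated_numbers_py max_len out) := by unfold Spec_generate_repeated_numbers_py; infer_instance

-- ===== CLAIM (what is proved, stated in full; the proofs are below) =====
def Claim_equal_generate_repeated_numbers_py : Prop := ∀ (max_len : Int), Dom_generate_repeated_numbers_py max_len → Spec_generate_repeated_numbers_py max_len (generate_repeated_numbers_py max_len)

-- ===== LEMMAS AND PROOFS =====

-- Shared abbreviations for the proof.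
def pats (k : Int) : List Int :=
  PySem.List.pyRange ((10 : Int) ^ (k - 1).toNat) ((10 : Int) ^ k.toNat) 1

def valf (L k p : Int) : Int :=
  (PySem.Int.ofChars? (PySem.List.pyRepeat (PySem.Int.toChars p) (PySem.Int.floordiv L k))).getD 0

def primB (k p : Int) : Bool :=
  ((PySem.List.pyRange 1 k 1).filter (fun d => decide (PySem.Int.mod k d = 0))).all
    (fun d => decide (PySem.Int.toChars p ≠
      PySem.List.pyRepeat (PySem.List.slice (PySem.Int.toChars p) none (some d))
        (PySem.Int.floordiv k d)))

def annBlock (L k : Int) : List (Int × Bool) :=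
  (pats k).map (fun p => (valf L k p, primB k p))

def KL (L k : Int) : List Int := ((pats k).filter (primB k)).map (valf L k)

def divList (L : Int) : List Int :=
  (PySem.List.pyRange 1 (PySem.Int.floordiv L 2 + 1) 1).filter
    (fun k => decide (PySem.Int.mod L k = 0))

def annL (L : Int) : List (Int × Bool) := (divList L).flatMap (annBlock L)

def ann (m : Int) : List (Int × Bool) := (PySem.List.pyRange 2 (m + 1) 1).flatMap annL

def addFst (s : PySem.Set Int) (x : Int × Bool) : PySem.Set Int := PySem.Set.add s x.1

-- "Every dropped (kept = false) element already occurs, by value, in the accumulated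
--  set of initial + kept elements to its left."
def Ok (s : PySem.Set Int) : List (Int × Bool) → Prop
  | [] => True
  | (v, true) :: rest => Ok (PySem.Set.add s v) rest
  | (v, false) :: rest => v ∈ s ∧ Ok s rest

def keptAcc (s : PySem.Set Int) (xs : List (Int × Bool)) : PySem.Set Int :=
  xs.foldl (fun s x => if x.2 then PySem.Set.add s x.1 else s) s

-- basic Ok lemmas
theorem add_of_mem {s : PySem.Set Int} {v : Int} (h : v ∈ s) : PySem.Set.add s v = s := by
  simp [PySem.Set.add, PySem.Set.contains, h]

theorem Ok_foldl (xs : List (Int × Bool)) :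
    ∀ (s : PySem.Set Int), Ok s xs →
      xs.foldl addFst s = (xs.filter (·.2)).foldl addFst s := by
  induction xs with
  | nil => intro s _; rfl
  | cons x rest ih =>
      rcases x with ⟨v, b⟩
      cases b with
      | true => intro s h; simpa [addFst] using ih _ h
      | false =>
          rintro s ⟨hv, h⟩
          simpa [addFst, add_of_mem hv] using ih _ h

theorem mem_keptAcc_of_mem (xs : List (Int × Bool)) :
    ∀ (s : PySem.Set Int) (v : Int), v ∈ s → v ∈ keptAcc s xs := by
  induction xs with
  | nil => intro s v h; exact h
  | cons x rest ih =>
      intro s v h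
      rcases x with ⟨w, b⟩
      cases b with
      | true => exact ih _ _ ((PySem.Set.mem_add s w v).2 (Or.inl h))
      | false => exact ih _ _ h

theorem mem_keptAcc_of_kept (xs : List (Int × Bool)) :
    ∀ (s : PySem.Set Int) (v : Int), (v, true) ∈ xs → v ∈ keptAcc s xs := by
  induction xs with
  | nil => intro s v h; simp at h
  | cons x rest ih =>
      intro s v h
      rcases x with ⟨w, b⟩
      rcases List.mem_cons.1 h with h' | h'
      · cases h'
        exact mem_keptAcc_of_mem rest _ v ((PySem.Set.mem_add s v v).2 (Or.inr rfl))
      · cases b with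
        | true => exact ih _ _ h'
        | false => exact ih _ _ h'

theorem Ok_append (xs : List (Int × Bool)) :
    ∀ (ys : List (Int × Bool)) (s : PySem.Set Int),
      Ok s xs → Ok (keptAcc s xs) ys → Ok s (xs ++ ys) := by
  induction xs with
  | nil => intro ys s _ h; exact h
  | cons x rest ih =>
      intro ys s h1 h2
      rcases x with ⟨v, b⟩
      cases b with
      | true => exact ih ys _ h1 h2
      | false => exact ⟨h1.1, ih ys _ h1.2 h2⟩

theorem Ok_of_all_mem (xs : List (Int × Bool)) :
    ∀ (s : PySem.Set Int), (∀ v, (v, false) ∈ xs → v ∈ s) → Ok s xs := by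
  induction xs with
  | nil => intro s _; trivial
  | cons x rest ih =>
      intro s h
      rcases x with ⟨v, b⟩
      cases b with
      | true =>
          exact ih _ (fun w hw => (PySem.Set.mem_add s v w).2
            (Or.inl (h w (List.mem_cons_of_mem _ hw))))
      | false =>
          exact ⟨h v (List.mem_cons_self ..), ih _ (fun w hw => h w (List.mem_cons_of_mem _ hw))⟩

-- ---------- integer / floordiv helpers ----------
theorem floordiv_of_eq_mul {r c L : Int} (hr : 0 < r) (hc : L = r * c) :
    PySem.Int.floordiv L r = c := by
  rw [PySem.Int.floordiv_eq_ediv_of_pos hr, hc, Int.mul_ediv_cancel_left _ (ne_of_gt hr)]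

theorem mem_divList {L k : Int} :
    k ∈ divList L ↔ (1 ≤ k ∧ k ≤ PySem.Int.floordiv L 2) ∧ k ∣ L := by
  simp only [divList, List.mem_filter, PySem.List.mem_pyRange_one, decide_eq_true_eq,
    PySem.Int.mod_eq_zero_iff_dvd]
  constructor
  · rintro ⟨⟨h1, h2⟩, h3⟩; exact ⟨⟨h1, by omega⟩, h3⟩
  · rintro ⟨⟨h1, h2⟩, h3⟩; exact ⟨⟨h1, by omega⟩, h3⟩

-- ---------- Nat.toDigits structure ----------
theorem toDigitsCore_append (b : Nat) :
    ∀ (f n : Nat) (l : List Char),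
      Nat.toDigitsCore b f n l = Nat.toDigitsCore b f n [] ++ l := by
  intro f
  induction f with
  | zero => intro n l; simp [Nat.toDigitsCore]
  | succ f ih =>
      intro n l
      simp only [Nat.toDigitsCore]
      by_cases h : n / b = 0
      · simp [h]
      · simp only [h, if_false]
        rw [ih (n / b) _, ih (n / b) [(n % b).digitChar]]
        simp

theorem toDigitsCore_fuel :
    ∀ (n f g : Nat), n < f → n < g →
      Nat.toDigitsCore 10 f n [] = Nat.toDigitsCore 10 g n [] := by
  intro n
  induction n using Nat.strong_induction_on with
  | _ n ih =>
      intro f g hf hg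
      match f, g with
      | f + 1, g + 1 =>
        simp only [Nat.toDigitsCore]
        by_cases h : n / 10 = 0
        · simp [h]
        · simp only [h, if_false]
          rw [toDigitsCore_append 10 f, toDigitsCore_append 10 g]
          have hlt : n / 10 < n := Nat.div_lt_self (by omega) (by norm_num)
          rw [ih (n / 10) hlt f g (by omega) (by omega)]

theorem toDigits_base {n : Nat} (h : n < 10) : Nat.toDigits 10 n = [n.digitChar] := by
  simp only [Nat.toDigits, Nat.toDigitsCore]
  have : n / 10 = 0 := Nat.div_eq_of_lt h
  simp [this, Nat.mod_eq_of_lt h]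

theorem toDigits_step {n : Nat} (h : 10 ≤ n) :
    Nat.toDigits 10 n = Nat.toDigits 10 (n / 10) ++ [(n % 10).digitChar] := by
  simp only [Nat.toDigits, Nat.toDigitsCore]
  have h0 : ¬ n / 10 = 0 := by
    have h1 : 1 ≤ n / 10 := (Nat.le_div_iff_mul_le (by norm_num)).2 (by omega)
    omega
  simp only [h0, if_false]
  rw [toDigitsCore_append]
  congr 1
  exact toDigitsCore_fuel (n / 10) n (n / 10 + 1) (Nat.div_lt_self (by omega) (by norm_num))
    (Nat.lt_succ_self _)

theorem toDigits_len :
    ∀ (j : Nat), 1 ≤ j → ∀ (n : Nat), 10 ^ (j - 1) ≤ n → n < 10 ^ j →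
      (Nat.toDigits 10 n).length = j := by
  intro j
  induction j with
  | zero => omega
  | succ j ih =>
      intro _ n h1 h2
      by_cases hj : j = 0
      · subst hj
        simp at h2
        rw [toDigits_base h2]
        rfl
      · have h10 : 10 ≤ n := by
          have : (10:Nat) ^ 1 ≤ 10 ^ (j + 1 - 1) := Nat.pow_le_pow_right (by norm_num) (by omega)
          simpa using le_trans this h1
        rw [toDigits_step h10, List.length_append]
        have := ih (by omega) (n / 10)
          (by
            rw [Nat.le_div_iff_mul_le (by norm_num)]
            calc 10 ^ (j - 1) * 10 = 10 ^ (j - 1 + 1) := by ring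
            _ ≤ n := by
              have : j - 1 + 1 = j + 1 - 1 := by omega
              rw [this]; exact h1)
          (by
            rw [Nat.div_lt_iff_lt_mul (by norm_num)]
            calc n < 10 ^ (j + 1) := h2
            _ = 10 ^ j * 10 := by ring)
        simp [this]

theorem toDigits_div_pow :
    ∀ (m n : Nat), 10 ^ m ≤ n →
      Nat.toDigits 10 (n / 10 ^ m)
        = (Nat.toDigits 10 n).take ((Nat.toDigits 10 n).length - m) := by
  intro m
  induction m with
  | zero => intro n _; simp
  | succ m ih =>
      intro n hn
      have h10 : 10 ≤ n := by
        have : (10:Nat) ^ 1 ≤ 10 ^ (m + 1) := Nat.pow_le_pow_right (by norm_num) (by omega)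
        simpa using le_trans this hn
      have hdiv : n / 10 ^ (m + 1) = (n / 10) / 10 ^ m := by
        rw [pow_succ, mul_comm ((10:Nat) ^ m) 10, ← Nat.div_div_eq_div_mul]
      have hn' : 10 ^ m ≤ n / 10 := by
        rw [Nat.le_div_iff_mul_le (by norm_num)]
        calc 10 ^ m * 10 = 10 ^ (m + 1) := by ring
        _ ≤ n := hn
      rw [hdiv, ih _ hn', toDigits_step h10]
      have hlen : (Nat.toDigits 10 n).length = (Nat.toDigits 10 (n / 10)).length + 1 := by
        rw [toDigits_step h10]; simp
      rw [toDigits_step h10] at *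
      rw [List.length_append]
      simp only [List.length_cons, List.length_nil]
      rw [List.take_append_of_le_length (by omega)]
      congr 1
      omega

-- ---------- pyRepeat ----------
theorem flatten_replicate_add {α : Type} (t : List α) :
    ∀ (m n : Nat), (List.replicate (m + n) t).flatten
      = (List.replicate m t).flatten ++ (List.replicate n t).flatten := by
  intro m
  induction m with
  | zero => intro n; simp
  | succ m ih => intro n; simp [List.replicate_succ, Nat.succ_add, ih]

theorem flatten_replicate_mul {α : Type} (t : List α) :
    ∀ (b a : Nat), (List.replicate b (List.replicate a t).flatten).flatten
      = (List.replicate (a * b) t).flatten := by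
  intro b
  induction b with
  | zero => intro a; simp
  | succ b ih =>
      intro a
      calc (List.replicate (b + 1) (List.replicate a t).flatten).flatten
          = (List.replicate a t).flatten
              ++ (List.replicate b (List.replicate a t).flatten).flatten := by
            simp [List.replicate_succ]
        _ = (List.replicate a t).flatten ++ (List.replicate (a * b) t).flatten := by rw [ih]
        _ = (List.replicate (a + a * b) t).flatten := (flatten_replicate_add t a (a * b)).symm
        _ = (List.replicate (a * (b + 1)) t).flatten := by ring_nf

theorem pyRepeat_pyRepeat (t : List Char) {a b : Int} (ha : 0 ≤ a) (hb : 0 ≤ b) :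
    PySem.List.pyRepeat (PySem.List.pyRepeat t a) b = PySem.List.pyRepeat t (a * b) := by
  simp only [PySem.List.pyRepeat]
  rw [flatten_replicate_mul, Int.toNat_mul ha hb]

theorem slice_to_toNat (xs : List Char) {d : Int} (hd : 0 ≤ d) :
    PySem.List.slice xs none (some d) = xs.take d.toNat := by
  have h : d = ((d.toNat : Nat) : Int) := by omega
  conv_lhs => rw [h]
  rw [PySem.List.slice_to_natCast]

-- more floordiv helpers
theorem fd_nonneg {a b : Int} (ha : 0 < a) (hb : 0 ≤ b) : 0 ≤ PySem.Int.floordiv b a := by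
  rw [PySem.Int.floordiv_eq_ediv_of_pos ha]
  exact Int.ediv_nonneg hb ha.le

theorem fd_comp {a b c : Int} (ha : 0 < a) (hb : 0 < b) (hab : a ∣ b) (hbc : b ∣ c) :
    PySem.Int.floordiv b a * PySem.Int.floordiv c b = PySem.Int.floordiv c a := by
  obtain ⟨u, hu⟩ := hab
  obtain ⟨v, hv⟩ := hbc
  rw [floordiv_of_eq_mul ha hu, floordiv_of_eq_mul hb hv,
      floordiv_of_eq_mul ha (show c = a * (u * v) by rw [hv, hu]; ring)]

-- ---------- the number-theoretic core ----------
theorem toChars_of_pats {k p : Int} (hk : 1 ≤ k) (hp : p ∈ pats k) :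
    PySem.Int.toChars p = Nat.toDigits 10 p.toNat
    ∧ 10 ^ (k.toNat - 1) ≤ p.toNat ∧ p.toNat < 10 ^ k.toNat := by
  rw [pats, PySem.List.mem_pyRange_one] at hp
  have hpow : (1:Int) ≤ (10 : Int) ^ (k - 1).toNat := one_le_pow₀ (by norm_num)
  have hp0 : 0 < p := lt_of_lt_of_le (by omega) hp.1
  refine ⟨?_, ?_, ?_⟩
  · simp [PySem.Int.toChars, not_lt_of_gt hp0]
  · have : ((10 ^ (k.toNat - 1) : Nat) : Int) = (10 : Int) ^ (k - 1).toNat := by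
      push_cast
      congr 1
      omega
    omega
  · have : ((10 ^ k.toNat : Nat) : Int) = (10 : Int) ^ k.toNat := by push_cast; rfl
    omega

theorem mem_pats_iff {k q : Int} (hk : 1 ≤ k) :
    q ∈ pats k ↔ (10 : Int) ^ (k.toNat - 1) ≤ q ∧ q < (10 : Int) ^ k.toNat := by
  rw [pats, PySem.List.mem_pyRange_one]
  have : (k - 1).toNat = k.toNat - 1 := by omega
  rw [this]

-- unpack primB = false
theorem primB_false_iff {k p : Int} :
    primB k p = false ↔ ∃ d, (1 ≤ d ∧ d < k) ∧ d ∣ k ∧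
      PySem.Int.toChars p = PySem.List.pyRepeat
        (PySem.List.slice (PySem.Int.toChars p) none (some d)) (PySem.Int.floordiv k d) := by
  simp only [primB, List.all_eq_false, List.mem_filter, PySem.List.mem_pyRange_one,
    decide_eq_true_eq, PySem.Int.mod_eq_zero_iff_dvd]
  constructor
  · rintro ⟨d, ⟨⟨h1, h2⟩, h3⟩, h4⟩; exact ⟨d, ⟨h1, h2⟩, h3, not_not.1 h4⟩
  · rintro ⟨d, ⟨h1, h2⟩, h3, h4⟩; exact ⟨d, ⟨⟨h1, h2⟩, h3⟩, not_not.2 h4⟩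

-- the heart: a non-primitive pattern's value already arises from a primitive pattern
-- of a strictly smaller length dividing k
theorem nt_aux (L k p : Int) (hk : 1 ≤ k) (hkL : k ∣ L) (hL : 1 ≤ L) (hp : p ∈ pats k) :
    ∀ (D : Nat) (d : Int), d.toNat = D → 1 ≤ d → d < k → d ∣ k →
      PySem.Int.toChars p = PySem.List.pyRepeat
        ((PySem.Int.toChars p).take d.toNat) (PySem.Int.floordiv k d) →
      ∃ d' q, 1 ≤ d' ∧ d' < k ∧ d' ∣ k ∧ q ∈ pats d' ∧ primB d' q = true ∧
        valf L d' q = valf L k p := by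
  obtain ⟨hchars, hplo, hphi⟩ := toChars_of_pats hk hp
  have hlen : (Nat.toDigits 10 p.toNat).length = k.toNat :=
    toDigits_len k.toNat (by omega) _ hplo hphi
  intro D
  induction D using Nat.strong_induction_on with
  | _ D ih =>
    intro d hdD hd1 hdk hddvd hper
    have hKD : d.toNat < k.toNat := by omega
    have hpowle : (10 : Nat) ^ (k.toNat - d.toNat) ≤ p.toNat :=
      le_trans (Nat.pow_le_pow_right (by norm_num) (by omega)) hplo
    obtain ⟨Q, hQdef⟩ : ∃ Q : Nat, Q = p.toNat / 10 ^ (k.toNat - d.toNat) := ⟨_, rfl⟩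
    have hQlo : 10 ^ (d.toNat - 1) ≤ Q := by
      rw [hQdef, Nat.le_div_iff_mul_le (Nat.pow_pos (by norm_num))]
      calc 10 ^ (d.toNat - 1) * 10 ^ (k.toNat - d.toNat)
          = 10 ^ (d.toNat - 1 + (k.toNat - d.toNat)) := by rw [pow_add]
        _ = 10 ^ (k.toNat - 1) := by congr 1; omega
        _ ≤ p.toNat := hplo
    have hQhi : Q < 10 ^ d.toNat := by
      rw [hQdef, Nat.div_lt_iff_lt_mul (Nat.pow_pos (by norm_num))]
      calc p.toNat < 10 ^ k.toNat := hphi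
        _ = 10 ^ d.toNat * 10 ^ (k.toNat - d.toNat) := by rw [← pow_add]; congr 1; omega
    have hq : ((Q : Nat) : Int) ∈ pats d := by
      rw [mem_pats_iff hd1]
      exact ⟨by exact_mod_cast hQlo, by exact_mod_cast hQhi⟩
    have hqchars : PySem.Int.toChars ((Q : Nat) : Int) = (PySem.Int.toChars p).take d.toNat := by
      have h1 : PySem.Int.toChars ((Q : Nat) : Int) = Nat.toDigits 10 Q := by
        simp [PySem.Int.toChars]
      rw [h1, hQdef, toDigits_div_pow _ _ hpowle, hlen, ← hchars]
      congr 1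
      omega
    have hk0 : (0 : Int) < k := by omega
    have hd0 : (0 : Int) < d := by omega
    have hkd0 : 0 ≤ PySem.Int.floordiv k d := fd_nonneg hd0 (by omega)
    have hLk0 : 0 ≤ PySem.Int.floordiv L k := fd_nonneg hk0 (by omega)
    have hvals : valf L d ((Q : Nat) : Int) = valf L k p := by
      have hrep : PySem.List.pyRepeat (PySem.Int.toChars ((Q : Nat) : Int))
          (PySem.Int.floordiv L d)
          = PySem.List.pyRepeat (PySem.Int.toChars p) (PySem.Int.floordiv L k) := by
        rw [hqchars, ← fd_comp hd0 hk0 hddvd hkL, ← pyRepeat_pyRepeat _ hkd0 hLk0, ← hper]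
      unfold valf
      rw [hrep]
    by_cases hprim : primB d ((Q : Nat) : Int) = true
    · exact ⟨d, _, hd1, hdk, hddvd, hq, hprim, hvals⟩
    · have hprimf : primB d ((Q : Nat) : Int) = false := eq_false_of_ne_true hprim
      obtain ⟨e, ⟨he1, hed⟩, heddvd, heq⟩ := primB_false_iff.1 hprimf
      rw [slice_to_toNat _ (by omega)] at heq
      have he0 : (0 : Int) < e := by omega
      have hde0 : 0 ≤ PySem.Int.floordiv d e := fd_nonneg he0 (by omega)
      have htake : (PySem.Int.toChars ((Q : Nat) : Int)).take e.toNat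
          = (PySem.Int.toChars p).take e.toNat := by
        rw [hqchars, List.take_take]
        congr 1
        omega
      have hper' : PySem.Int.toChars p = PySem.List.pyRepeat
          ((PySem.Int.toChars p).take e.toNat) (PySem.Int.floordiv k e) := by
        calc PySem.Int.toChars p
            = PySem.List.pyRepeat ((PySem.Int.toChars p).take d.toNat)
                (PySem.Int.floordiv k d) := hper
          _ = PySem.List.pyRepeat (PySem.Int.toChars ((Q : Nat) : Int))
                (PySem.Int.floordiv k d) := by rw [hqchars]
          _ = PySem.List.pyRepeat (PySem.List.pyRepeat
                ((PySem.Int.toChars ((Q : Nat) : Int)).take e.toNat)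
                (PySem.Int.floordiv d e)) (PySem.Int.floordiv k d) := by rw [← heq]
          _ = PySem.List.pyRepeat ((PySem.Int.toChars ((Q : Nat) : Int)).take e.toNat)
                (PySem.Int.floordiv d e * PySem.Int.floordiv k d) :=
              pyRepeat_pyRepeat _ hde0 hkd0
          _ = PySem.List.pyRepeat ((PySem.Int.toChars p).take e.toNat)
                (PySem.Int.floordiv k e) := by rw [htake, fd_comp he0 hd0 heddvd hddvd]
      exact ih e.toNat (by omega) e rfl he1 (by omega) (dvd_trans heddvd hddvd) hper'

theorem nt_core (L k p : Int) (hk : 1 ≤ k) (hkL : k ∣ L) (hL : 1 ≤ L)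
    (hp : p ∈ pats k) (hnp : primB k p = false) :
    ∃ d' q, 1 ≤ d' ∧ d' < k ∧ d' ∣ k ∧ q ∈ pats d' ∧ primB d' q = true ∧
      valf L d' q = valf L k p := by
  obtain ⟨d, ⟨h1, h2⟩, h3, h4⟩ := primB_false_iff.1 hnp
  rw [slice_to_toNat _ (by omega)] at h4
  exact nt_aux L k p hk hkL hL hp d.toNat d rfl h1 h2 h3 h4

-- ---------- Ok for the generated sequence ----------
theorem ok_annBlock (L k : Int) (s : PySem.Set Int) (hk : 1 ≤ k) (hkL : k ∣ L) (hL : 1 ≤ L)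
    (H : ∀ d, 1 ≤ d → d < k → d ∣ k → ∀ v, v ∈ KL L d → v ∈ s) :
    Ok s (annBlock L k) := by
  apply Ok_of_all_mem
  intro v hv
  simp only [annBlock, List.mem_map] at hv
  obtain ⟨p, hp, hpair⟩ := hv
  have hval : valf L k p = v := congrArg Prod.fst hpair
  have hprim : primB k p = false := congrArg Prod.snd hpair
  obtain ⟨d, q, hd1, hd2, hd3, hq, hqp, hval'⟩ := nt_core L k p hk hkL hL hp hprim
  refine H d hd1 hd2 hd3 v ?_
  rw [KL, List.mem_map]
  exact ⟨q, List.mem_filter.2 ⟨hq, hqp⟩, by rw [hval', hval]⟩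

theorem KL_subset_keptAcc (L k : Int) (s : PySem.Set Int) :
    ∀ v, v ∈ KL L k → v ∈ keptAcc s (annBlock L k) := by
  intro v hv
  simp only [KL, List.mem_map, List.mem_filter] at hv
  obtain ⟨q, ⟨hq, hqp⟩, rfl⟩ := hv
  apply mem_keptAcc_of_kept
  simp only [annBlock, List.mem_map]
  exact ⟨q, hq, by rw [hqp]⟩

theorem ok_chain (L : Int) (hL : 1 ≤ L) :
    ∀ (ks : List Int) (s : PySem.Set Int),
      ks.Pairwise (· < ·) →
      (∀ k ∈ ks, 1 ≤ k ∧ k ∣ L) →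
      (∀ k ∈ ks, ∀ d, 1 ≤ d → d < k → d ∣ k →
        (∀ v, v ∈ KL L d → v ∈ s) ∨ d ∈ ks) →
      Ok s (ks.flatMap (annBlock L)) := by
  intro ks
  induction ks with
  | nil => intro s _ _ _; simp only [List.flatMap_nil]; trivial
  | cons k0 rest ih =>
      intro s hsort hdvd hinv
      rw [List.flatMap_cons]
      have hk0 := hdvd k0 (List.mem_cons_self ..)
      have hhead : ∀ d, 1 ≤ d → d < k0 → d ∣ k0 → ∀ v, v ∈ KL L d → v ∈ s := by
        intro d h1 h2 h3
        rcases hinv k0 (List.mem_cons_self ..) d h1 h2 h3 with h | h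
        · exact h
        · rcases List.mem_cons.1 h with rfl | hmem
          · omega
          · have := (List.pairwise_cons.1 hsort).1 d hmem
            omega
      apply Ok_append
      · exact ok_annBlock L k0 s hk0.1 hk0.2 hL hhead
      · apply ih
        · exact (List.pairwise_cons.1 hsort).2
        · intro k hk; exact hdvd k (List.mem_cons_of_mem _ hk)
        · intro k hk d h1 h2 h3
          rcases hinv k (List.mem_cons_of_mem _ hk) d h1 h2 h3 with h | h
          · exact Or.inl (fun v hv => mem_keptAcc_of_mem _ _ _ (h v hv))
          · rcases List.mem_cons.1 h with rfl | hmem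
            · exact Or.inl (fun v hv => KL_subset_keptAcc L d s v hv)
            · exact Or.inr hmem

theorem pairwise_divList (L : Int) : (divList L).Pairwise (· < ·) :=
  (PySem.List.pairwise_lt_pyRange_one _ _).filter _

theorem ok_annL (L : Int) (hL : 2 ≤ L) (s : PySem.Set Int) : Ok s (annL L) := by
  rw [annL]
  apply ok_chain L (by omega) _ s (pairwise_divList L)
  · intro k hk
    have := mem_divList.1 hk
    exact ⟨this.1.1, this.2⟩
  · intro k hk d h1 h2 h3
    right
    have hm := mem_divList.1 hk
    rw [mem_divList]
    exact ⟨⟨h1, by omega⟩, dvd_trans h3 hm.2⟩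

theorem ok_ann (m : Int) : Ok PySem.Set.empty (ann m) := by
  rw [ann]
  have : ∀ (l : List Int), (∀ L ∈ l, 2 ≤ L) → ∀ s, Ok s (l.flatMap annL) := by
    intro l
    induction l with
    | nil => intro _ s; simp only [List.flatMap_nil]; trivial
    | cons L rest ih =>
        intro h s
        rw [List.flatMap_cons]
        exact Ok_append _ _ _ (ok_annL L (h L (List.mem_cons_self ..)) s)
          (ih (fun x hx => h x (List.mem_cons_of_mem _ hx)) _)
  exact this _ (fun L hL => (PySem.List.mem_pyRange_one.1 hL).1) _

-- ---------- folds over flatMap ----------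
theorem foldl_flatMap {α β γ : Type} (l : List α) (g : α → List β) (f : γ → β → γ) :
    ∀ (i : γ), (l.flatMap g).foldl f i = l.foldl (fun a x => (g x).foldl f a) i := by
  induction l with
  | nil => intro i; rfl
  | cons x rest ih => intro i; rw [List.flatMap_cons, List.foldl_append, List.foldl_cons, ih]

theorem foldl_ite_filter {α β : Type} (q : α → Prop) [DecidablePred q] (f : β → α → β) :
    ∀ (l : List α) (init : β),
      l.foldl (fun s x => if q x then f s x else s) init
        = (l.filter (fun x => decide (q x))).foldl f init
  | [], _ => rfl
  | x :: l, init => by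
      by_cases h : q x <;> simp [h, foldl_ite_filter q f l]

-- ---------- A's port in terms of ann ----------
theorem innerA_eq (L : Int) (s : PySem.Set Int) :
    (PySem.List.pyRange 1 (PySem.Int.floordiv L 2 + 1) 1).foldl (fun repeated k =>
      if PySem.Int.mod L k ≠ 0 then repeated
      else
        let repeats := PySem.Int.floordiv L k
        if repeats < 2 then repeated
        else
          let start := (10 : Int) ^ (k - 1).toNat
          let endv := (10 : Int) ^ k.toNat - 1
          (PySem.List.pyRange start (endv + 1) 1).foldl (fun repeated pattern =>
            let str := PySem.List.pyRepeat (PySem.Int.toChars pattern) repeats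
            let num := (PySem.Int.ofChars? str).getD 0
            PySem.Set.add repeated num) repeated) s
    = (divList L).foldl (fun s k => (annBlock L k).foldl addFst s) s := by
  have h1 : ∀ (repeated : PySem.Set Int) (k : Int),
      (if PySem.Int.mod L k ≠ 0 then repeated
       else
        let repeats := PySem.Int.floordiv L k
        if repeats < 2 then repeated
        else
          let start := (10 : Int) ^ (k - 1).toNat
          let endv := (10 : Int) ^ k.toNat - 1
          (PySem.List.pyRange start (endv + 1) 1).foldl (fun repeated pattern =>
            let str := PySem.List.pyRepeat (PySem.Int.toChars pattern) repeats
            let num := (PySem.Int.ofChars? str).getD 0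
            PySem.Set.add repeated num) repeated)
      = (if PySem.Int.mod L k = 0 then
          (fun (s : PySem.Set Int) (k : Int) =>
            if PySem.Int.floordiv L k < 2 then s
            else ((PySem.List.pyRange ((10 : Int) ^ (k - 1).toNat)
                    ((10 : Int) ^ k.toNat - 1 + 1) 1).foldl
                    (fun s p => PySem.Set.add s (valf L k p)) s)) repeated k
         else repeated) := by
    intro repeated k
    by_cases h : PySem.Int.mod L k = 0
    · rw [if_neg (by simp [h]), if_pos h]; rfl
    · rw [if_pos h, if_neg h]
  rw [PySem.List.foldl_congr_mem _ _ _ _ (fun acc k _ => h1 acc k),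
      foldl_ite_filter (fun k => PySem.Int.mod L k = 0)]
  apply PySem.List.foldl_congr_mem
  intro acc k hk
  obtain ⟨⟨hk1, hk2⟩, hdvd⟩ := mem_divList.1 hk
  have hk0 : (0 : Int) < k := by omega
  have hk2' : k * 2 ≤ L := (PySem.Int.le_floordiv_iff_mul_le (by norm_num : (0:Int) < 2)).1 hk2
  have hr2 : 2 ≤ PySem.Int.floordiv L k :=
    (PySem.Int.le_floordiv_iff_mul_le hk0).2 (by omega)
  rw [if_neg (not_lt.2 hr2),
      show (10 : Int) ^ k.toNat - 1 + 1 = (10 : Int) ^ k.toNat by ring,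
      annBlock, List.foldl_map]
  rfl

theorem A_eq (m : Int) :
    generate_repeated_numbers_py m = (ann m).foldl addFst PySem.Set.empty := by
  unfold generate_repeated_numbers_py
  rw [ann, foldl_flatMap]
  apply PySem.List.foldl_congr_mem
  intro s L _
  rw [innerA_eq L s, annL, foldl_flatMap]

-- ---------- B's port in terms of ann ----------
theorem dict_get?_foldl_notmem (f : Int → List Int) :
    ∀ (l : List Int) (x : Int), x ∉ l → ∀ (d : PySem.Dict Int (List Int)),
      (l.foldl (fun d k => d.insert k (f k)) d).get? x = d.get? x := by
  intro l
  induction l with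
  | nil => intro x _ d; rfl
  | cons k rest ih =>
      intro x hx d
      rw [List.foldl_cons, ih x (fun h => hx (List.mem_cons_of_mem _ h))]
      have hne : x ≠ k := fun hh => hx (hh ▸ List.mem_cons_self ..)
      apply PySem.Dict.get?_insert_of_ne
      exact hne

theorem dict_get?_foldl_mem (f : Int → List Int) :
    ∀ (l : List Int) (x : Int), l.Nodup → x ∈ l → ∀ (d : PySem.Dict Int (List Int)),
      (l.foldl (fun d k => d.insert k (f k)) d).get? x = some (f x) := by
  intro l
  induction l with
  | nil => intro x _ hx; simp at hx
  | cons k rest ih =>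
      intro x hnd hx d
      rw [List.foldl_cons]
      rcases List.mem_cons.1 hx with rfl | hmem
      · rw [dict_get?_foldl_notmem f rest x (List.nodup_cons.1 hnd).1]
        apply PySem.Dict.get?_insert_self
      · exact ih x (List.nodup_cons.1 hnd).2 hmem _

theorem flatMap_congr_mem {α β : Type} (l : List α) (f g : α → List β)
    (h : ∀ x ∈ l, f x = g x) : l.flatMap f = l.flatMap g := by
  induction l with
  | nil => rfl
  | cons x rest ih =>
      rw [List.flatMap_cons, List.flatMap_cons, h x (List.mem_cons_self ..),
        ih (fun y hy => h y (List.mem_cons_of_mem _ hy))]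

theorem filter_flatMap' {α β : Type} (l : List α) (g : α → List β) (p : β → Bool) :
    (l.flatMap g).filter p = l.flatMap (fun x => (g x).filter p) := by
  induction l with
  | nil => rfl
  | cons x rest ih => rw [List.flatMap_cons, List.flatMap_cons, List.filter_append, ih]

theorem map_flatMap' {α β γ : Type} (l : List α) (g : α → List β) (f : β → γ) :
    (l.flatMap g).map f = l.flatMap (fun x => (g x).map f) := by
  induction l with
  | nil => rfl
  | cons x rest ih => rw [List.flatMap_cons, List.flatMap_cons, List.map_append, ih]

theorem filter_map_annBlock (L k : Int) :
    ((annBlock L k).filter (·.2)).map (·.1) = KL L k := by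
  rw [annBlock, KL, List.filter_map, List.map_map]
  rfl

theorem filter_map_ann (m : Int) :
    ((ann m).filter (·.2)).map (·.1)
      = (PySem.List.pyRange 2 (m + 1) 1).flatMap (fun L => (divList L).flatMap (KL L)) := by
  rw [ann, filter_flatMap', map_flatMap']
  congr 1
  funext L
  rw [annL, filter_flatMap', map_flatMap']
  congr 1
  funext k
  exact filter_map_annBlock L k

theorem stage1_get? (m k : Int) (hk1 : 1 ≤ k) (hk2 : k ≤ PySem.Int.floordiv m 2) :
    ((PySem.List.pyRange 1 (PySem.Int.floordiv m 2 + 1) 1).foldl (fun prim k =>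
      prim.insert k
        ((PySem.List.pyRange ((10 : Int) ^ (k - 1).toNat) ((10 : Int) ^ k.toNat) 1).filter
          (fun p =>
            ((PySem.List.pyRange 1 k 1).filter (fun d => decide (PySem.Int.mod k d = 0))).all
              (fun d => decide (PySem.Int.toChars p ≠
                PySem.List.pyRepeat (PySem.List.slice (PySem.Int.toChars p) none (some d))
                  (PySem.Int.floordiv k d)))))) PySem.Dict.empty).get? k
    = some ((pats k).filter (primB k)) := by
  have hnd : (PySem.List.pyRange 1 (PySem.Int.floordiv m 2 + 1) 1).Nodup :=
    (PySem.List.pairwise_lt_pyRange_one _ _).imp ne_of_lt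
  have hmem : k ∈ PySem.List.pyRange 1 (PySem.Int.floordiv m 2 + 1) 1 :=
    PySem.List.mem_pyRange_one.2 ⟨hk1, by omega⟩
  exact dict_get?_foldl_mem (fun k => (pats k).filter (primB k)) _ k hnd hmem _

theorem stage2_eq (m : Int) (prim : PySem.Dict Int (List Int))
    (hprim : ∀ k, 1 ≤ k → k ≤ PySem.Int.floordiv m 2 →
      prim.get? k = some ((pats k).filter (primB k))) :
    (PySem.List.pyRange 2 (m + 1) 1).foldl (fun out total_len =>
      (PySem.List.pyRange 1 (PySem.Int.floordiv total_len 2 + 1) 1).foldl (fun out k =>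
        if PySem.Int.mod total_len k = 0 then
          out ++ ((prim.get? k).getD []).map (fun p =>
            (PySem.Int.ofChars? (PySem.List.pyRepeat (PySem.Int.toChars p)
              (PySem.Int.floordiv total_len k))).getD 0)
        else out) out) ([] : List Int)
    = (PySem.List.pyRange 2 (m + 1) 1).flatMap (fun L => (divList L).flatMap (KL L)) := by
  have inner : ∀ L, 2 ≤ L → L ≤ m → ∀ (out : List Int),
      (PySem.List.pyRange 1 (PySem.Int.floordiv L 2 + 1) 1).foldl (fun out k =>
        if PySem.Int.mod L k = 0 then
          out ++ ((prim.get? k).getD []).map (fun p =>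
            (PySem.Int.ofChars? (PySem.List.pyRepeat (PySem.Int.toChars p)
              (PySem.Int.floordiv L k))).getD 0)
        else out) out
      = out ++ (divList L).flatMap (KL L) := by
    intro L hL2 hLm out
    rw [PySem.List.foldl_ite_eq_foldl_filter, PySem.List.foldl_append_eq_flatMap]
    congr 1
    apply flatMap_congr_mem
    intro k hk
    obtain ⟨⟨hk1, hk2⟩, _⟩ := mem_divList.1 hk
    have hk2' : k ≤ PySem.Int.floordiv m 2 := by
      have h2 : (0:Int) < 2 := by norm_num
      have : PySem.Int.floordiv L 2 ≤ PySem.Int.floordiv m 2 := by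
        rw [PySem.Int.floordiv_eq_ediv_of_pos h2, PySem.Int.floordiv_eq_ediv_of_pos h2]
        exact Int.ediv_le_ediv h2 hLm
      omega
    rw [hprim k hk1 hk2']
    rfl
  rw [PySem.List.foldl_congr_mem _ _ _ _ (fun acc L hL =>
      inner L (PySem.List.mem_pyRange_one.1 hL).1
        (by have := (PySem.List.mem_pyRange_one.1 hL).2; omega) acc),
    PySem.List.foldl_append_eq_flatMap]
  simp

theorem B_eq (m : Int) :
    generate_repeated_numbers_py_alt m
      = PySem.Set.ofList (((ann m).filter (·.2)).map (·.1)) := by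
  rw [filter_map_ann]
  exact congrArg PySem.Set.ofList (stage2_eq m _ (fun k h1 h2 => stage1_get? m k h1 h2))

-- ===== VERDICT (by name: the statement is the Claim_ definition above) =====
theorem generate_repeated_numbers_py_spec : Claim_equal_generate_repeated_numbers_py := by
  intro m _
  unfold Spec_generate_repeated_numbers_py
  rw [A_eq, B_eq, Ok_foldl _ _ (ok_ann m)]
  rw [show PySem.Set.ofList (((ann m).filter (·.2)).map (·.1))
      = (((ann m).filter (·.2)).map (·.1)).foldl PySem.Set.add [] from rfl]
  rw [List.foldl_map]
  rfl
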